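-- pv_equiv track=rewrite | github.com/Jmw150/Complex-Algebraic-Geometry | tools/cag_audit/remove_zero_dependents.py | _skip_comment
-- ===== SOURCE A (Python) =====
-- def _skip_comment(src: str, i: int) -> int:
--     depth = 1
--     i += 2
--     while i < len(src) and depth:
--         if src.startswith("(*", i):
--             depth += 1
--             i += 2
--         elif src.startswith("*)", i):
--             depth -= 1
--             i += 2
--         else:
--             i += 1
--     return i
-- ===== SOURCE B (Python) =====
-- def _skip_comment(src: str, i: int) -> int:
--     # Jump from token to token with str.find instead of stepping one
--     # character at a time: the next "(*" opens a nested comment, the next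
--     # "*)" closes one; no closer ahead means the comment is unterminated.
--     i += 2
--     depth = 1
--     while i < len(src):
--         o = src.find("(*", i)
--         c = src.find("*)", i)
--         if c == -1:
--             return len(src)
--         if o != -1 and o < c:
--             depth += 1
--             i = o + 2
--         else:
--             depth -= 1
--             i = c + 2
--             if depth == 0:
--                 return i
--     return i
-- ===== Notes on version B (the rewrite author's own statement) =====
-- stated objective: faster
-- what changed: The character-by-character scan with a depth counter is replaced by a token-jump loop: str.find locates the next '(*' and the next '*)' and the scan jumps straight to whichever comes first, so positions between tokens are never visited one by one at Python level.
-- outside the precondition, e.g. on _skip_comment('*)', -10): A returns -6, B returns 2; on _skip_comment('(*', -1000000): A returns 2, B returns 2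
import Mathlib
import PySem

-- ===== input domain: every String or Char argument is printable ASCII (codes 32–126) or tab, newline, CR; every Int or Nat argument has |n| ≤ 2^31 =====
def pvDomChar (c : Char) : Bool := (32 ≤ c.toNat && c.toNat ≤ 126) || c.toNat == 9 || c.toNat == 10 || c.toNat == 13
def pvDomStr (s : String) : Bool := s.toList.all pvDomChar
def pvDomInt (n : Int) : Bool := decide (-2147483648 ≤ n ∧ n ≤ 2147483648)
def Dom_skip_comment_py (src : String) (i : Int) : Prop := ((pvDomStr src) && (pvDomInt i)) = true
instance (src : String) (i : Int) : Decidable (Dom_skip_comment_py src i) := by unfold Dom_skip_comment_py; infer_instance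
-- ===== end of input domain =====

-- B replaces A's character-by-character scan (depth counter, one position at a
-- time) by a token-jump loop using str.find; measurably faster (C-level find).


-- ===== PORT A =====
-- hand port of Python's `src.startswith(<two chars>, i)`: a negative start is
-- shifted by len and clamped to 0 (slice rule), and the two-character prefix
-- must fit entirely inside the string; exact.
def pvSw2 (l : List Char) (a b : Char) (i : Int) : Bool :=
  match l.drop ((if i < 0 then (l.length : Int) + i else i).toNat) with
  | c :: d :: _ => c == a && d == b
  | _ => false

-- A's while-loop: state (i, depth), one character position per iteration.
def pvAloop (l : List Char) (i : Int) (depth : Int) : Int :=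
  if h : i < (l.length : Int) ∧ depth ≠ 0 then
    if pvSw2 l '(' '*' i then pvAloop l (i + 2) (depth + 1)
    else if pvSw2 l '*' ')' i then pvAloop l (i + 2) (depth - 1)
    else pvAloop l (i + 1) depth
  else i
termination_by ((l.length : Int) - i).toNat
decreasing_by all_goals (obtain ⟨h1, _⟩ := h; omega)

def skip_comment_py (src : String) (i : Int) : Int :=
  pvAloop src.toList (i + 2) 1

-- ===== PORT B =====
-- B's while-loop: state (i, depth); each iteration finds the next "(*" and
-- the next "*)" (PySem.Chars.findFrom = str.find with a start bound) and
-- jumps to whichever comes first.  fuel only makes the loop total; the fuel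
-- skip_comment_py_alt supplies is never exhausted (each jump advances i).
def pvBloop (l : List Char) (fuel : Nat) (i : Int) (depth : Int) : Int :=
  match fuel with
  | 0 => i
  | n + 1 =>
    if i < (l.length : Int) then
      let o := PySem.Chars.findFrom l ['(', '*'] i
      let c := PySem.Chars.findFrom l ['*', ')'] i
      if c = -1 then (l.length : Int)
      else if o ≠ -1 ∧ o < c then pvBloop l n (o + 2) (depth + 1)
      else if depth - 1 = 0 then c + 2
      else pvBloop l n (c + 2) (depth - 1)
    else i

def skip_comment_py_alt (src : String) (i : Int) : Int :=
  pvBloop src.toList (src.toList.length + 3) (i + 2) 1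

-- ===== PRECONDITION & SPEC =====
-- Pre_ excludes i < -2: there the scan start i+2 is still negative, Python's
-- startswith/find clamp it to the string head while A's raw counter keeps its
-- negative value (a slice-clamping artefact), so A's result on such inputs is
-- accidental and B does not reproduce it.
def Pre_skip_comment_py (src : String) (i : Int) : Prop := -2 ≤ i
instance (src : String) (i : Int) : Decidable (Pre_skip_comment_py src i) := by unfold Pre_skip_comment_py; infer_instance

def pvWitness_skip_comment_py : String × Int := ("(* a (* b *) c *) d", 0)

def Spec_skip_comment_py (src : String) (i : Int) (out : Int) : Prop := out = skip_comment_py_alt src i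
instance (src : String) (i : Int) (out : Int) : Decidable (Spec_skip_comment_py src i out) := by unfold Spec_skip_comment_py; infer_instance

-- ===== CLAIM (what is proved, stated in full; the proofs are below) =====
def Claim_equal_skip_comment_py : Prop := ∀ (src : String) (i : Int), Dom_skip_comment_py src i → Pre_skip_comment_py src i → Spec_skip_comment_py src i (skip_comment_py src i)

-- ===== LEMMAS AND PROOFS =====

-- pvSw2 at a (cast) nonnegative position is a two-character prefix test
theorem pvSw2_iff_prefix (l : List Char) (a b : Char) (k : Nat) :
    pvSw2 l a b (k : Int) = true ↔ [a, b] <+: l.drop k := by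
  unfold pvSw2
  rw [if_neg (by omega), show ((k : Int)).toNat = k from Int.toNat_natCast k]
  rcases hd : l.drop k with _ | ⟨c, _ | ⟨d, t⟩⟩
  · simp
  · simp
  · simp only [Bool.and_eq_true, beq_iff_eq, List.cons_prefix_cons, List.nil_prefix, and_true]
    exact ⟨fun ⟨h1, h2⟩ => ⟨h1.symm, h2.symm⟩, fun ⟨h1, h2⟩ => ⟨h1.symm, h2.symm⟩⟩

theorem pvSw2_eq_false (l : List Char) (a b : Char) (k : Nat)
    (h : ¬ [a, b] <+: l.drop k) : pvSw2 l a b (k : Int) = false := by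
  rw [← Bool.not_eq_true, pvSw2_iff_prefix l a b k]; exact h

-- a two-character prefix of a drop needs two characters of room
theorem pvPrefix_room (l : List Char) (a b : Char) (q : Nat)
    (h : [a, b] <+: l.drop q) : q + 2 ≤ l.length := by
  have := h.length_le
  simp [List.length_drop] at this
  omega

-- a prefix somewhere at/after position k is an infix of the drop at k
theorem pvPrefix_infix (l : List Char) (sub : List Char) (k q : Nat) (hkq : k ≤ q)
    (h : sub <+: l.drop q) : sub <:+: l.drop k := by
  have hdd : l.drop q = (l.drop k).drop (q - k) := by
    rw [List.drop_drop]; congr 1; omega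
  rw [hdd] at h
  exact h.isInfix.trans (List.drop_suffix _ _).isInfix

-- step lemmas for pvAloop
theorem pvAloop_of_len_le (l : List Char) (i d : Int) (h : (l.length : Int) ≤ i) :
    pvAloop l i d = i := by
  rw [pvAloop, dif_neg (by omega)]

theorem pvAloop_zero (l : List Char) (i : Int) : pvAloop l i 0 = i := by
  rw [pvAloop, dif_neg (by simp)]

theorem pvAloop_open (l : List Char) (i d : Int) (h : i < (l.length : Int)) (hd : d ≠ 0)
    (h1 : pvSw2 l '(' '*' i = true) : pvAloop l i d = pvAloop l (i + 2) (d + 1) := by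
  rw [pvAloop, dif_pos ⟨h, hd⟩, if_pos h1]

theorem pvAloop_close (l : List Char) (i d : Int) (h : i < (l.length : Int)) (hd : d ≠ 0)
    (h1 : pvSw2 l '(' '*' i = false) (h2 : pvSw2 l '*' ')' i = true) :
    pvAloop l i d = pvAloop l (i + 2) (d - 1) := by
  rw [pvAloop, dif_pos ⟨h, hd⟩]
  simp [h1, h2]

theorem pvAloop_other (l : List Char) (i d : Int) (h : i < (l.length : Int)) (hd : d ≠ 0)
    (h1 : pvSw2 l '(' '*' i = false) (h2 : pvSw2 l '*' ')' i = false) :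
    pvAloop l i d = pvAloop l (i + 1) d := by
  rw [pvAloop, dif_pos ⟨h, hd⟩]
  simp [h1, h2]

-- a token-free stretch is crossed one character at a time without effect
theorem pvWalk (l : List Char) : ∀ (j k : Nat) (d : Int),
    k + j ≤ l.length → 1 ≤ d →
    (∀ q : Nat, k ≤ q → q < k + j →
      ¬ ['(', '*'] <+: l.drop q ∧ ¬ ['*', ')'] <+: l.drop q) →
    pvAloop l (k : Int) d = pvAloop l ((k + j : Nat) : Int) d := by
  intro j
  induction j with
  | zero => intro k d _ _ _; norm_num
  | succ j ih =>
    intro k d hj hd htok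
    have hq := htok k (le_refl _) (by omega)
    have h1 := pvSw2_eq_false l '(' '*' k hq.1
    have h2 := pvSw2_eq_false l '*' ')' k hq.2
    rw [pvAloop_other l (k : Int) d (by omega) (by omega) h1 h2]
    have hcast : ((k : Int) + 1) = ((k + 1 : Nat) : Int) := by push_cast; ring
    rw [hcast]
    have hstep := ih (k + 1) d (by omega) hd
      (fun q hq1 hq2 => htok q (by omega) (by omega))
    rw [hstep]
    congr 1
    omega

-- with no closer ahead, A scans to the end of the string and returns len
theorem pvEnd (l : List Char) : ∀ (n k : Nat) (d : Int),
    k ≤ l.length → l.length - k ≤ n → 1 ≤ d →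
    (∀ q : Nat, k ≤ q → ¬ ['*', ')'] <+: l.drop q) →
    pvAloop l (k : Int) d = (l.length : Int) := by
  intro n
  induction n with
  | zero =>
    intro k d hk hn _ _
    rw [show k = l.length by omega, pvAloop_of_len_le l _ d (le_refl _)]
  | succ n ih =>
    intro k d hk hn hd htok
    rcases eq_or_lt_of_le hk with heq | hlt
    · rw [heq, pvAloop_of_len_le l _ d (le_refl _)]
    · have h2 := pvSw2_eq_false l '*' ')' k (htok k (le_refl _))
      by_cases h1 : pvSw2 l '(' '*' (k : Int) = true
      · have hroom : k + 2 ≤ l.length :=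
          pvPrefix_room l '(' '*' k ((pvSw2_iff_prefix l '(' '*' k).mp h1)
        rw [pvAloop_open l (k : Int) d (by omega) (by omega) h1]
        rw [show ((k : Int) + 2) = ((k + 2 : Nat) : Int) by push_cast; ring]
        exact ih (k + 2) (d + 1) (by omega) (by omega) (by omega)
          (fun q hq => htok q (by omega))
      · rw [pvAloop_other l (k : Int) d (by omega) (by omega) (by simpa using h1) h2]
        rw [show ((k : Int) + 1) = ((k + 1 : Nat) : Int) by push_cast; ring]
        exact ih (k + 1) d (by omega) (by omega) hd
          (fun q hq => htok q (by omega))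

-- one unfolding step of pvBloop
theorem pvBloop_succ (l : List Char) (n : Nat) (i depth : Int) :
    pvBloop l (n + 1) i depth =
      if i < (l.length : Int) then
        if PySem.Chars.findFrom l ['*', ')'] i = -1 then (l.length : Int)
        else if PySem.Chars.findFrom l ['(', '*'] i ≠ -1 ∧
            PySem.Chars.findFrom l ['(', '*'] i < PySem.Chars.findFrom l ['*', ')'] i then
          pvBloop l n (PySem.Chars.findFrom l ['(', '*'] i + 2) (depth + 1)
        else if depth - 1 = 0 then PySem.Chars.findFrom l ['*', ')'] i + 2
        else pvBloop l n (PySem.Chars.findFrom l ['*', ')'] i + 2) (depth - 1)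
      else i := rfl

-- main simulation: one find-jump of B corresponds to a token-free walk of A
-- followed by one token step
theorem pvMain (l : List Char) : ∀ (fuel : Nat) (p d : Int), 0 ≤ p → 1 ≤ d →
    ((l.length : Int) - p).toNat + 2 ≤ 2 * fuel →
    pvAloop l p d = pvBloop l fuel p d := by
  intro fuel
  induction fuel with
  | zero => intro p d _ _ hf; omega
  | succ n ih =>
    intro p d hp hd hf
    rw [pvBloop_succ]
    by_cases hpl : p < (l.length : Int)
    · rw [if_pos hpl]
      obtain ⟨k, rfl⟩ : ∃ k : Nat, p = (k : Int) := ⟨p.toNat, (Int.toNat_of_nonneg hp).symm⟩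
      have hk : k ≤ l.length := by omega
      by_cases hc : PySem.Chars.findFrom l ['*', ')'] (k : Int) = -1
      · rw [if_pos hc]
        have hninf := (PySem.Chars.findFrom_natCast_eq_neg_one_iff l ['*', ')'] k hk).mp hc
        refine pvEnd l (l.length - k) k d hk (le_refl _) hd ?_
        intro q hq habs
        exact hninf (pvPrefix_infix l ['*', ')'] k q hq habs)
      · rw [if_neg hc]
        obtain ⟨hcp, hcpre, hcmin⟩ :=
          PySem.Chars.findFrom_natCast_spec l ['*', ')'] k hk hc
        set c := PySem.Chars.findFrom l ['*', ')'] (k : Int) with hcdef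
        have hc0 : 0 ≤ c := le_trans (by positivity) hcp
        have hcl : c.toNat + 2 ≤ l.length := pvPrefix_room l '*' ')' c.toNat hcpre
        have hck : ((c.toNat : Nat) : Int) = c := Int.toNat_of_nonneg hc0
        by_cases ho : PySem.Chars.findFrom l ['(', '*'] (k : Int) ≠ -1 ∧
            PySem.Chars.findFrom l ['(', '*'] (k : Int) < c
        · -- an opener comes first: walk to it, nest, recurse
          rw [if_pos ho]
          obtain ⟨hone, holt⟩ := ho
          obtain ⟨hop, hopre, homin⟩ :=
            PySem.Chars.findFrom_natCast_spec l ['(', '*'] k hk hone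
          set o := PySem.Chars.findFrom l ['(', '*'] (k : Int) with hodef
          have ho0 : 0 ≤ o := le_trans (by positivity) hop
          have hol : o.toNat + 2 ≤ l.length := pvPrefix_room l '(' '*' o.toNat hopre
          have hok : ((o.toNat : Nat) : Int) = o := Int.toNat_of_nonneg ho0
          have hwalk : pvAloop l (k : Int) d = pvAloop l ((k + (o.toNat - k) : Nat) : Int) d := by
            refine pvWalk l (o.toNat - k) k d (by omega) hd ?_
            intro q hq1 hq2
            exact ⟨homin q hq1 (by omega), hcmin q hq1 (by omega)⟩
          rw [hwalk, show ((k + (o.toNat - k) : Nat) : Int) = o by omega]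
          have hopen : pvSw2 l '(' '*' o = true := by
            rw [← hok, pvSw2_iff_prefix l '(' '*' o.toNat]; exact hopre
          rw [pvAloop_open l o d (by omega) (by omega) hopen]
          exact ih (o + 2) (d + 1) (by omega) (by omega) (by omega)
        · -- the closer comes first: walk to it, close, return or recurse
          rw [if_neg ho]
          -- at every position in [k, c] there is no opener
          have hnoA : ∀ q : Nat, k ≤ q → q ≤ c.toNat → ¬ ['(', '*'] <+: l.drop q := by
            intro q hq1 hq2 habs
            by_cases hone : PySem.Chars.findFrom l ['(', '*'] (k : Int) = -1
            · exact (PySem.Chars.findFrom_natCast_eq_neg_one_iff l ['(', '*'] k hk).mp hone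
                (pvPrefix_infix l ['(', '*'] k q hq1 habs)
            · obtain ⟨hop, hopre, homin⟩ :=
                PySem.Chars.findFrom_natCast_spec l ['(', '*'] k hk hone
              set o := PySem.Chars.findFrom l ['(', '*'] (k : Int) with hodef
              have hco : c ≤ o := by
                rcases not_and_or.mp ho with h | h
                · exact absurd hone (by simpa using h)
                · omega
              have hne : o ≠ c := by
                intro he
                have hpc : ['(', '*'] <+: l.drop c.toNat := he ▸ hopre
                rcases hd2 : l.drop c.toNat with _ | ⟨x, t⟩
                · rw [hd2] at hcpre; simp at hcpre
                · rw [hd2] at hpc hcpre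
                  have e1 : x = '(' := (List.cons_prefix_cons.mp hpc).1.symm
                  have e2 : x = '*' := (List.cons_prefix_cons.mp hcpre).1.symm
                  rw [e1] at e2; exact absurd e2 (by decide)
              have ho0 : 0 ≤ o := le_trans (by positivity) hop
              exact homin q hq1 (by omega) habs
          have hwalk : pvAloop l (k : Int) d = pvAloop l ((k + (c.toNat - k) : Nat) : Int) d := by
            refine pvWalk l (c.toNat - k) k d (by omega) hd ?_
            intro q hq1 hq2
            exact ⟨hnoA q hq1 (by omega), hcmin q hq1 (by omega)⟩
          rw [hwalk, show ((k + (c.toNat - k) : Nat) : Int) = c by omega]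
          have hclose : pvSw2 l '*' ')' c = true := by
            rw [← hck, pvSw2_iff_prefix l '*' ')' c.toNat]; exact hcpre
          have hnoAc : pvSw2 l '(' '*' c = false := by
            rw [← hck]
            exact pvSw2_eq_false l '(' '*' c.toNat (hnoA c.toNat (by omega) (le_refl _))
          rw [pvAloop_close l c d (by omega) (by omega) hnoAc hclose]
          by_cases hd1 : d - 1 = 0
          · rw [if_pos hd1, hd1, pvAloop_zero]
          · rw [if_neg hd1]
            exact ih (c + 2) (d - 1) (by omega) (by omega) (by omega)
    · rw [if_neg hpl, pvAloop_of_len_le l p d (by omega)]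

-- ===== VERDICT (by name: the statement is the Claim_ definition above) =====
theorem skip_comment_py_spec : Claim_equal_skip_comment_py := by
  intro src i _ hpre
  unfold Spec_skip_comment_py skip_comment_py skip_comment_py_alt
  have hpre' : -2 ≤ i := hpre
  exact pvMain src.toList (src.toList.length + 3) (i + 2) 1 (by omega) (by omega) (by omega)
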